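-- pv_equiv track=rewrite | github.com/rae-holcomb/sset | sset/trc_funcs.py | num_continuous
-- ===== SOURCE A (Python) =====
-- def num_continuous(arr, allow_gap=0):
--     """Returns the length of the longest sequence of consecutive integers in an ordered list.
--     Setting allow_gap indicates how big of an integer gap can be ignored when counting continuous sequences."""
--     if len(arr) == 1:
--         return arr
--
--     count = 1
--     max_count = 1
--
--     ind_start, ind_end = 0, 1
--     max_ind_start, max_ind_end = 0, 1
--
--     for i in range(len(arr) - 1):
--         if arr[i + 1] - arr[i] <= 1 + allow_gap:
--             count += 1
--             ind_end += 1
--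
--             if count > max_count:
--                 max_count = count
--                 max_ind_start = ind_start
--                 max_ind_end = ind_end
--         else:
--             count = 1
--             ind_start = i + 1
--             ind_end = i + 2
--
--     return arr[max_ind_start:max_ind_end]
-- ===== SOURCE B (Python) =====
-- def num_continuous(arr, allow_gap=0):
--     """Split arr once into maximal near-consecutive runs, then pick the first
--     longest run (max with key=len keeps the first maximum, like A)."""
--     if not arr:
--         return []
--     runs, cur = [], [arr[0]]
--     for x in arr[1:]:
--         if x - cur[-1] <= 1 + allow_gap:
--             cur.append(x)
--         else:
--             runs.append(cur)
--             cur = [x]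
--     runs.append(cur)
--     return max(runs, key=len)
-- ===== Notes on version B (the rewrite author's own statement) =====
-- stated objective: simpler
-- what changed: Instead of A's index bookkeeping (six counters tracking current/best slice bounds, then a slice), B splits the list once into maximal near-consecutive runs and returns max(runs, key=len), which keeps A's first-longest tie-break.
import Mathlib
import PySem

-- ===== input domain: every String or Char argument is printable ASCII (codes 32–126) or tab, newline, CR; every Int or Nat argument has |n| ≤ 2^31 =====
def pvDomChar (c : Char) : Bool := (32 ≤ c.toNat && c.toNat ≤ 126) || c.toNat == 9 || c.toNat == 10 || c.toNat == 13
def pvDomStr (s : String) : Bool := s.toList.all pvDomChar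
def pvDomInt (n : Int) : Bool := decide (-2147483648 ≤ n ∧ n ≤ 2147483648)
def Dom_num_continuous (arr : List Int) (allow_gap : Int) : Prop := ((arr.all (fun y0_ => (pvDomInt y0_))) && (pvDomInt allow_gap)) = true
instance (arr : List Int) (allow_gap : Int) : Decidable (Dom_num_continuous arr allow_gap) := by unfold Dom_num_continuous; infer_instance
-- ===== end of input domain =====

-- B replaces A's six-counter slice bookkeeping by a split-into-runs pass plus max(runs, key=len); objective: simpler.

-- ===== PORT A =====
-- loop body of A's for-loop; state = (count, max_count, ind_start, ind_end, max_ind_start, max_ind_end)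
def aStep (arr : List Int) (allow_gap : Int)
    (st : Int × Int × Int × Int × Int × Int) (i : Int) : Int × Int × Int × Int × Int × Int :=
  let (count, max_count, ind_start, ind_end, max_ind_start, max_ind_end) := st
  if PySem.List.pyGetD arr (i + 1) 0 - PySem.List.pyGetD arr i 0 ≤ 1 + allow_gap then
    let count := count + 1
    let ind_end := ind_end + 1
    if count > max_count then
      (count, count, ind_start, ind_end, ind_start, ind_end)
    else
      (count, max_count, ind_start, ind_end, max_ind_start, max_ind_end)
  else
    (1, max_count, i + 1, i + 2, max_ind_start, max_ind_end)

def num_continuous (arr : List Int) (allow_gap : Int) : List Int :=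
  if arr.length = 1 then arr
  else
    let st := (PySem.List.pyRange 0 ((arr.length : Int) - 1) 1).foldl (aStep arr allow_gap)
      (1, 1, 0, 1, 0, 1)
    PySem.List.slice arr (some st.2.2.2.2.1) (some st.2.2.2.2.2)

-- ===== PORT B =====
-- loop body of B's for-loop; state = (runs, cur)
def bStep (allow_gap : Int) (p : List (List Int) × List Int) (x : Int) :
    List (List Int) × List Int :=
  if x - PySem.List.pyGetD p.2 (-1) 0 ≤ 1 + allow_gap then (p.1, p.2 ++ [x]) else (p.1 ++ [p.2], [x])

-- Python's max(runs, key=len): first element as initial best, strictly-greater replaces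
def pyMaxByLen : List (List Int) → List Int
  | [] => []
  | r :: rs => rs.foldl (fun best c => if c.length > best.length then c else best) r

def num_continuous_alt (arr : List Int) (allow_gap : Int) : List Int :=
  match arr with
  | [] => []
  | a :: rest =>
    let p := rest.foldl (bStep allow_gap) ([], [a])
    pyMaxByLen (p.1 ++ [p.2])

-- ===== PRECONDITION & SPEC =====
def Spec_num_continuous (arr : List Int) (allow_gap : Int) (out : List Int) : Prop := out = num_continuous_alt arr allow_gap
instance (arr : List Int) (allow_gap : Int) (out : List Int) : Decidable (Spec_num_continuous arr allow_gap out) := by unfold Spec_num_continuous; infer_instance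

-- ===== CLAIM (what is proved, stated in full; the proofs are below) =====
def Claim_equal_num_continuous : Prop := ∀ (arr : List Int) (allow_gap : Int), Dom_num_continuous arr allow_gap → Spec_num_continuous arr allow_gap (num_continuous arr allow_gap)


-- ===== LEMMAS AND PROOFS =====

-- A's loop as a function of the list (proof-side abbreviation of the fold in the A port)
def AFold (g : Int) (xs : List Int) : Int × Int × Int × Int × Int × Int :=
  (PySem.List.pyRange 0 ((xs.length : Int) - 1) 1).foldl (aStep xs g) (1, 1, 0, 1, 0, 1)

-- B's loop as a function of the tail (proof-side abbreviation of the fold in the B port)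
def BFold (g a : Int) (rest : List Int) : List (List Int) × List Int :=
  rest.foldl (bStep g) ([], [a])

lemma pm_append (L : List (List Int)) (c : List Int) (hL : L ≠ []) :
    pyMaxByLen (L ++ [c]) =
      if c.length > (pyMaxByLen L).length then c else pyMaxByLen L := by
  obtain ⟨r, rs, rfl⟩ := List.exists_cons_of_ne_nil hL
  simp [pyMaxByLen, List.foldl_append]

lemma pyGetD_append_lt (xs : List Int) (x : Int) (j : Int) (_h0 : 0 ≤ j)
    (hj : j < (xs.length : Int)) :
    PySem.List.pyGetD (xs ++ [x]) j 0 = PySem.List.pyGetD xs j 0 := by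
  rw [PySem.List.pyGetD_eq_getElem _ _ _h0 (by simp; omega),
      PySem.List.pyGetD_eq_getElem _ _ _h0 (by omega)]
  exact List.getElem_append_left (by omega)

lemma aStep_append_eq (xs : List Int) (x g : Int) (st : Int × Int × Int × Int × Int × Int)
    (i : Int) (h0 : 0 ≤ i) (hi : i + 1 < (xs.length : Int)) :
    aStep (xs ++ [x]) g st i = aStep xs g st i := by
  obtain ⟨c, mc, s, e, ms, me⟩ := st
  simp only [aStep,
    pyGetD_append_lt xs x (i + 1) (by omega) hi,
    pyGetD_append_lt xs x i h0 (by omega)]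

lemma AFold_snoc (g : Int) (xs : List Int) (hx : xs ≠ []) (x : Int) :
    AFold g (xs ++ [x]) = aStep (xs ++ [x]) g (AFold g xs) ((xs.length : Int) - 1) := by
  have hlen : 1 ≤ xs.length := List.length_pos_of_ne_nil hx
  unfold AFold
  have h1 : ((xs ++ [x]).length : Int) - 1 = (((xs.length : Int) - 1) + 1) := by
    simp [List.length_append]
  rw [h1, PySem.List.pyRange_one_succ_right (by omega), List.foldl_append]
  simp only [List.foldl_cons, List.foldl_nil]
  congr 1
  refine PySem.List.foldl_congr_mem _ _ _ _ (fun acc i hi => ?_)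
  have hm := (PySem.List.mem_pyRange_one.mp hi)
  exact aStep_append_eq xs x g acc i hm.1 (by omega)

lemma BFold_snoc (g a : Int) (rest : List Int) (x : Int) :
    BFold g a (rest ++ [x]) = bStep g (BFold g a rest) x := by
  simp [BFold, List.foldl_append]

lemma dropTake_append_eq (xs : List Int) (x : Int) (ms me : Int) (_h0 : 0 ≤ ms)
    (h1 : ms ≤ me) (hme : me ≤ (xs.length : Int)) :
    ((xs ++ [x]).drop ms.toNat).take (me.toNat - ms.toNat) =
      (xs.drop ms.toNat).take (me.toNat - ms.toNat) := by
  have hms : ms.toNat ≤ xs.length := by omega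
  rw [List.drop_append_of_le_length hms,
      List.take_append_of_le_length (by simp; omega)]

-- the inductive invariant tying A's six counters to B's (runs, cur) state
def InvC (a : Int) (rest : List Int) (c mc s e ms me : Int)
    (runs : List (List Int)) (cur : List Int) : Prop :=
  a :: rest = runs.flatten ++ cur ∧ cur ≠ [] ∧
  c = (cur.length : Int) ∧
  s = (runs.flatten.length : Int) ∧
  e = ((a :: rest).length : Int) ∧
  0 ≤ ms ∧ ms ≤ me ∧ me ≤ ((a :: rest).length : Int) ∧
  mc = me - ms ∧ 1 ≤ mc ∧
  ((a :: rest).drop ms.toNat).take (me.toNat - ms.toNat) = pyMaxByLen (runs ++ [cur]) ∧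
  me - ms = ((pyMaxByLen (runs ++ [cur])).length : Int)

lemma inv_main (g a : Int) (rest : List Int) :
    ∀ c mc s e ms me runs cur,
      AFold g (a :: rest) = (c, mc, s, e, ms, me) →
      BFold g a rest = (runs, cur) →
      InvC a rest c mc s e ms me runs cur := by
  induction rest using List.reverseRecOn with
  | nil =>
    intro c mc s e ms me runs cur hA hB
    have h0 : PySem.List.pyRange 0 (((a :: ([] : List Int)).length : Int) - 1) 1 = [] := by
      rw [PySem.List.pyRange_one_eq_nil] ; simp
    simp only [AFold, h0, List.foldl_nil, Prod.mk.injEq] at hA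
    simp only [BFold, List.foldl_nil, Prod.mk.injEq] at hB
    obtain ⟨rfl, rfl, rfl, rfl, rfl, rfl⟩ := hA
    obtain ⟨rfl, rfl⟩ := hB
    refine ⟨by simp, by simp, by simp, by simp, by simp, by norm_num, by norm_num, by simp,
      by norm_num, by norm_num, ?_, ?_⟩
    · simp [pyMaxByLen]
    · simp [pyMaxByLen]
  | append_singleton rest x ih =>
    intro c' mc' s' e' ms' me' runs' cur' hA hB
    rcases hS : AFold g (a :: rest) with ⟨c, mc, s, e, ms, me⟩
    rcases hP : BFold g a rest with ⟨runs, cur⟩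
    obtain ⟨hdec, hcne, hc, hs, he, hms0, hmsme, hmeN, hmc, hmc1, hdt, hlenM⟩ :=
      ih c mc s e ms me runs cur hS hP
    have hxs : a :: (rest ++ [x]) = (a :: rest) ++ [x] := by simp
    rw [hxs, AFold_snoc g (a :: rest) (by simp) x, hS] at hA
    rw [BFold_snoc, hP] at hB
    -- the two lookups in A's last step
    have htop : PySem.List.pyGetD ((a :: rest) ++ [x]) ((((a :: rest).length : Int) - 1) + 1) 0 = x := by
      have h1 : (((a :: rest).length : Int) - 1) + 1 = ((a :: rest).length : Int) := by ring
      rw [h1, PySem.List.pyGetD_eq_getElem _ _ (by omega) (by simp)]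
      have h2 : ((a :: rest).length : Int).toNat = (a :: rest).length := by omega
      simp only [h2]
      exact List.getElem_concat_length rfl (by simp)
    have hlast : PySem.List.pyGetD ((a :: rest) ++ [x]) (((a :: rest).length : Int) - 1) 0 =
        cur.getLast hcne := by
      rw [PySem.List.pyGetD_eq_getElem _ _ (by simp only [List.length_cons]; omega)
        (by simp only [List.length_append, List.length_cons]; push_cast; omega)]
      have h2 : (((a :: rest).length : Int) - 1).toNat = (a :: rest).length - 1 := by
        simp only [List.length_cons]; omega
      simp only [h2]
      rw [List.getElem_append_left (by simp)]
      have h5 : (a :: rest)[(a :: rest).length - 1]'(by simp) =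
          (a :: rest).getLast (by simp) := (List.getLast_eq_getElem _).symm
      rw [h5]
      calc (a :: rest).getLast (by simp)
          = (runs.flatten ++ cur).getLast (by rw [← hdec]; simp) := by
            congr 1
        _ = cur.getLast hcne := List.getLast_append_of_ne_nil _ hcne
    -- B's last-element lookup
    have hBlast : PySem.List.pyGetD cur (-1) 0 = cur.getLast hcne :=
      PySem.List.pyGetD_neg_one cur 0 hcne
    -- length bookkeeping
    have hNlen : (a :: rest).length = runs.flatten.length + cur.length := by
      have h6 := congrArg List.length hdec
      simpa using h6
    simp only [aStep, htop, hlast] at hA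
    simp only [bStep, hBlast] at hB
    by_cases hcond : x - cur.getLast hcne ≤ 1 + g
    · rw [if_pos hcond] at hA hB
      by_cases hbig : c + 1 > mc
      · rw [if_pos hbig] at hA
        simp only [Prod.mk.injEq] at hA hB
        obtain ⟨rfl, rfl, rfl, rfl, rfl, rfl⟩ := hA
        obtain ⟨rfl, rfl⟩ := hB
        have hMeq : pyMaxByLen (runs ++ [cur ++ [x]]) = cur ++ [x] := by
          by_cases hr : runs = []
          · subst hr; simp [pyMaxByLen]
          · rw [pm_append _ _ hr]
            have hM := pm_append runs cur hr
            by_cases hcf : cur.length > (pyMaxByLen runs).length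
            · rw [if_pos (by simp; omega)]
            · rw [if_neg hcf] at hM
              rw [hM] at hlenM
              rw [if_pos (by simp; omega)]
        refine ⟨?_, by simp, by simp only [List.length_append, List.length_cons, List.length_nil] at *; omega,
          hs, by simp only [List.length_cons, List.length_append, List.length_nil] at *; omega,
          by omega, ?_, ?_, ?_, by omega, ?_, ?_⟩
        · rw [hxs, hdec, List.append_assoc]
        · simp only [List.length_cons, List.length_append, List.length_nil] at *; omega
        · simp only [List.length_cons, List.length_append, List.length_nil] at *; omega
        · simp only [List.length_cons, List.length_append, List.length_nil] at *; omega
        · rw [hMeq, hxs, hdec, List.append_assoc]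
          have hsN : s.toNat = runs.flatten.length := by omega
          have heN : (e + 1).toNat - s.toNat = cur.length + 1 := by
            simp only [List.length_cons] at *; omega
          rw [heN, hsN, List.drop_left]
          exact List.take_of_length_le (by simp)
        · rw [hMeq]
          simp only [List.length_cons, List.length_append, List.length_nil] at *; omega
      · rw [if_neg hbig] at hA
        simp only [Prod.mk.injEq] at hA hB
        obtain ⟨rfl, rfl, rfl, rfl, rfl, rfl⟩ := hA
        obtain ⟨rfl, rfl⟩ := hB
        have hr : runs ≠ [] := by
          intro hr0; subst hr0
          simp only [List.nil_append, pyMaxByLen, List.foldl_nil] at hlenM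
          omega
        have hM := pm_append runs cur hr
        have hcf : ¬ cur.length > (pyMaxByLen runs).length := by
          intro hcf0
          rw [if_pos hcf0] at hM
          rw [hM] at hlenM
          omega
        rw [if_neg hcf] at hM
        have hkeep : pyMaxByLen (runs ++ [cur ++ [x]]) = pyMaxByLen (runs ++ [cur]) := by
          rw [pm_append _ _ hr, hM]
          rw [hM] at hlenM
          rw [if_neg (by simp; omega)]
        refine ⟨?_, by simp, by simp only [List.length_append, List.length_cons, List.length_nil] at *; omega,
          hs, by simp only [List.length_cons, List.length_append, List.length_nil] at *; omega,
          hms0, hmsme, ?_, hmc, hmc1, ?_, ?_⟩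
        · rw [hxs, hdec, List.append_assoc]
        · simp only [List.length_cons, List.length_append, List.length_nil] at *; omega
        · rw [hkeep, hxs, dropTake_append_eq _ _ _ _ hms0 hmsme hmeN]
          exact hdt
        · rw [hkeep]; exact hlenM
    · rw [if_neg hcond] at hA hB
      simp only [Prod.mk.injEq] at hA hB
      obtain ⟨rfl, rfl, rfl, rfl, rfl, rfl⟩ := hA
      obtain ⟨rfl, rfl⟩ := hB
      have hkeep : pyMaxByLen ((runs ++ [cur]) ++ [[x]]) = pyMaxByLen (runs ++ [cur]) := by
        rw [pm_append _ _ (by simp)]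
        have hlen1 : 1 ≤ (pyMaxByLen (runs ++ [cur])).length := by omega
        rw [if_neg (by simp only [List.length_singleton]; omega)]
      refine ⟨?_, by simp, by simp, ?_, ?_, hms0, hmsme, ?_, hmc, hmc1, ?_, ?_⟩
      · rw [hxs, hdec]; simp [List.flatten_append]
      · simp only [List.flatten_append, List.flatten_cons, List.flatten_nil, List.append_nil,
          List.length_append, List.length_cons] at *
        omega
      · simp only [List.length_cons, List.length_append, List.length_nil] at *; omega
      · simp only [List.length_cons, List.length_append, List.length_nil] at *; omega
      · rw [hkeep, hxs, dropTake_append_eq _ _ _ _ hms0 hmsme hmeN]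
        exact hdt
      · rw [hkeep]; exact hlenM

-- ===== VERDICT (by name: the statement is the Claim_ definition above) =====
theorem num_continuous_spec : Claim_equal_num_continuous := by
  intro arr g _hdom
  unfold Spec_num_continuous
  cases arr with
  | nil =>
    simp [num_continuous, num_continuous_alt, PySem.List.pyRange_one_eq_nil,
      PySem.List.slice]
  | cons a rest =>
    by_cases h1 : rest = []
    · subst h1
      simp [num_continuous, num_continuous_alt, pyMaxByLen]
    · have hlen : (a :: rest).length ≠ 1 := by
        simp only [List.length_cons]
        have := List.length_pos_of_ne_nil h1
        omega
      rcases hS : AFold g (a :: rest) with ⟨c, mc, s, e, ms, me⟩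
      rcases hP : BFold g a rest with ⟨runs, cur⟩
      obtain ⟨hdec, hcne, hc, hs, he, hms0, hmsme, hmeN, hmc, hmc1, hdt, hlenM⟩ :=
        inv_main g a rest c mc s e ms me runs cur hS hP
      have hA : num_continuous (a :: rest) g = PySem.List.slice (a :: rest) (some ms) (some me) := by
        simp only [num_continuous, if_neg hlen]
        rw [show (List.foldl (aStep (a :: rest) g) (1, 1, 0, 1, 0, 1)
          (PySem.List.pyRange 0 (((a :: rest).length : Int) - 1) 1)) = AFold g (a :: rest) from rfl,
          hS]
      have hB : num_continuous_alt (a :: rest) g = pyMaxByLen (runs ++ [cur]) := by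
        simp only [num_continuous_alt]
        rw [show rest.foldl (bStep g) ([], [a]) = BFold g a rest from rfl, hP]
      rw [hA, hB, PySem.List.slice_toNat _ hms0 (by omega)]
      exact hdt
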